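-- pv_equiv track=rewrite | github.com/gurditsbedi/algorithms | ProjectEuler/53.py | cachefact
-- ===== SOURCE A (Python) =====
-- def cachefact(limit):
--     def fact(n):
--         p = 1
--         for i in range(1, n + 1):
--             p *= i
--         return p
--
--     facttable = {}
--     for i in range(limit + 1):
--         facttable[i] = fact(i)
--
--     return facttable
-- ===== SOURCE B (Python) =====
-- def cachefact(limit):
--     facttable = {}
--     i, p = 0, 1
--     while i <= limit:
--         facttable[i] = p
--         i += 1
--         p *= i
--     return facttable
-- ===== Notes on version B (the rewrite author's own statement) =====
-- stated objective: faster
-- what changed: Replaces recomputing each factorial from scratch with a single running product carried across the loop (each factorial derived from the previous one).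
import Mathlib
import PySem

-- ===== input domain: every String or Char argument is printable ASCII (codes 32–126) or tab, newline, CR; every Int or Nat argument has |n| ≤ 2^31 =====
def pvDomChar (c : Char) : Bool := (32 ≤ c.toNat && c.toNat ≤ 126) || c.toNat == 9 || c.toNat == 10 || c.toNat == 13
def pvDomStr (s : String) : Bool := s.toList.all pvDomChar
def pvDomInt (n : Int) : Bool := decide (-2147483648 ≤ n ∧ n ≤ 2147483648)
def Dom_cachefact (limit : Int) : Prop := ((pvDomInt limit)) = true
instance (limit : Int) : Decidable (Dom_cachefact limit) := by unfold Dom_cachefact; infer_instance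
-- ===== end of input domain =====

-- B replaces A's from-scratch factorial per key with one running product; returns the same dict.

-- ===== PORT A =====
-- inner helper `fact`: p = 1; for i in range(1, n+1): p *= i
def factA (n : Int) : Int :=
  (PySem.List.pyRange 1 (n + 1) 1).foldl (fun p i => p * i) 1

-- facttable = {}; for i in range(limit+1): facttable[i] = fact(i)
def cachefact (limit : Int) : List (Int × Int) :=
  ((PySem.List.pyRange 0 (limit + 1) 1).foldl
    (fun d i => d.insert i (factA i)) (PySem.Dict.empty : PySem.Dict Int Int)).items

-- ===== PORT B =====
-- while i <= limit: facttable[i] = p; i += 1; p *= i   (structural recursion on fuel = limit+1 steps)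
def buildB (i p : Int) (fuel : Nat) : List (Int × Int) :=
  match fuel with
  | 0 => []
  | k + 1 => (i, p) :: buildB (i + 1) (p * (i + 1)) k

def cachefact_alt (limit : Int) : List (Int × Int) :=
  buildB 0 1 (limit + 1).toNat

-- ===== PRECONDITION & SPEC =====
def Spec_cachefact (limit : Int) (out : List (Int × Int)) : Prop := out = cachefact_alt limit
instance (limit : Int) (out : List (Int × Int)) : Decidable (Spec_cachefact limit out) := by unfold Spec_cachefact; infer_instance

-- ===== CLAIM (what is proved, stated in full; the proofs are below) =====
def Claim_equal_cachefact : Prop := ∀ (limit : Int), Dom_cachefact limit → Spec_cachefact limit (cachefact limit)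

-- ===== LEMMAS AND PROOFS =====

-- A's loop over fresh distinct keys appends: its dict's items are the mapped range.
theorem cachefact_eq_map (limit : Int) :
    cachefact limit = (PySem.List.pyRange 0 (limit + 1) 1).map (fun i => (i, factA i)) := by
  unfold cachefact
  have h := PySem.Dict.items_foldl_insert_fresh (l := PySem.List.pyRange 0 (limit + 1) 1)
    (k := fun i => i) (v := factA)
    (d := (PySem.Dict.empty : PySem.Dict Int Int))
    (by intro a _; simp [PySem.Dict.contains_empty])
    (by simpa using PySem.List.nodup_pyRange_one (a := 0) (b := limit + 1))
  simpa [PySem.Dict.empty] using h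

-- the running product steps like the factorial
theorem factA_succ (i : Int) (h : 0 ≤ i) : factA (i + 1) = factA i * (i + 1) := by
  unfold factA
  rw [PySem.List.pyRange_one_succ_right (a := 1) (b := i + 1) (by omega)]
  rw [List.foldl_append]
  rfl

-- B's recursion produces the mapped range starting at i, given the running product is factA i
theorem buildB_eq_map (n : Nat) : ∀ (i : Int), 0 ≤ i →
    buildB i (factA i) n = (PySem.List.pyRange i (i + n) 1).map (fun j => (j, factA j)) := by
  induction n with
  | zero =>
    intro i _
    simp [buildB, PySem.List.pyRange_one_eq_nil]
  | succ k ih =>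
    intro i hi
    have harg : i + ((k + 1 : Nat) : Int) = (i + 1) + (k : Nat) := by push_cast; ring
    rw [harg, PySem.List.pyRange_one_cons (by omega : i < (i + 1) + (k : Nat))]
    simp only [buildB, List.map_cons]
    rw [← factA_succ i hi, ih (i + 1) (by omega)]

-- ===== VERDICT (by name: the statement is the Claim_ definition above) =====
theorem cachefact_spec : Claim_equal_cachefact := by
  intro limit _
  show cachefact limit = cachefact_alt limit
  rw [cachefact_eq_map]
  unfold cachefact_alt
  have h1 : factA 0 = 1 := rfl
  have hb := buildB_eq_map (limit + 1).toNat 0 le_rfl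
  rw [h1] at hb
  rw [hb]
  by_cases h : 0 ≤ limit + 1
  · congr 2
    omega
  · have h0 : (limit + 1).toNat = 0 := by omega
    rw [h0, PySem.List.pyRange_one_eq_nil (by omega),
        PySem.List.pyRange_one_eq_nil (by simp : (0:Int) + ((0:Nat):Int) ≤ 0)]
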